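-- pv_equiv track=rewrite | github.com/printjin-gmailcom/2024--Code_States-SSU-Coding_Test | image5.py | solution
-- ===== SOURCE A (Python) =====
-- def solution(record):
-- 	answer = 0
-- 	remains = 0
--
-- 	for rec in record:
-- 		remains += rec
-- 		if remains < 0:
-- 			answer += 1
--
-- 	return answer
-- ===== SOURCE B (Python) =====
-- def solution(record):
--     # Divide and conquer: the number of negative prefix sums of xs started at
--     # offset `base` equals that of the left half at `base` plus that of the
--     # right half at `base + sum(left half)`.
--     def go(xs, base):
--         n = len(xs)
--         if n == 0:
--             return 0
--         if n == 1:
--             return 1 if base + xs[0] < 0 else 0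
--         left, right = xs[:n // 2], xs[n // 2:]
--         return go(left, base) + go(right, base + sum(left))
--     return go(record, 0)
-- ===== Notes on version B (the rewrite author's own statement) =====
-- stated objective: alternative
-- what changed: Replaces A's single left-to-right accumulator loop by a divide-and-conquer recursion: split the list in halves, solve each half independently with the right half's offset shifted by the left half's total, and add the two counts.
import Mathlib
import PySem

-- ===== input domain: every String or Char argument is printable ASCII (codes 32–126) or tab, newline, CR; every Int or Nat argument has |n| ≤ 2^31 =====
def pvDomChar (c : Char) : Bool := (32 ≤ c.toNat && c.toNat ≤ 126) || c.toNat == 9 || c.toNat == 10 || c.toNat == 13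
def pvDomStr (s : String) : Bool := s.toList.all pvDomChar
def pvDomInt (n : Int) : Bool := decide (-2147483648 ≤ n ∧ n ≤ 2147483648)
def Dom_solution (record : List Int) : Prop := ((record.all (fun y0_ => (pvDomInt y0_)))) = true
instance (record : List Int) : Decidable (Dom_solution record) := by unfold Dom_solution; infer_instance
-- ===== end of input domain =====

-- B replaces A's single accumulator loop by a divide-and-conquer recursion on halves (alternative decomposition, not faster).

-- ===== PORT A =====
-- A: one loop maintaining (answer, remains); increment answer when remains < 0.
def solution (record : List Int) : Int :=
  (record.foldl
    (fun (st : Int × Int) rec =>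
      let remains := st.2 + rec
      (if remains < 0 then st.1 + 1 else st.1, remains))
    (0, 0)).1

-- ===== PORT B =====
-- B's recursive helper go(xs, base): split at the middle, right half offset by sum(left).
def solGo (xs : List Int) (base : Int) : Int :=
  if xs.length = 0 then 0
  else if xs.length = 1 then
    if base + xs.headI < 0 then 1 else 0
  else
    solGo (xs.take (xs.length / 2)) base
      + solGo (xs.drop (xs.length / 2)) (base + (xs.take (xs.length / 2)).sum)
termination_by xs.length
decreasing_by
  · simp only [List.length_take]; omega
  · simp only [List.length_drop]; omega

def solution_alt (record : List Int) : Int := solGo record 0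

-- ===== PRECONDITION & SPEC =====
def Spec_solution (record : List Int) (out : Int) : Prop := out = solution_alt record
instance (record : List Int) (out : Int) : Decidable (Spec_solution record out) := by unfold Spec_solution; infer_instance

-- ===== CLAIM (what is proved, stated in full; the proofs are below) =====
def Claim_equal_solution : Prop := ∀ (record : List Int), Dom_solution record → Spec_solution record (solution record)

-- ===== LEMMAS AND PROOFS =====
-- Specification function: number of negative prefix sums of xs starting from base.
def negPref (base : Int) : List Int → Int
  | [] => 0
  | x :: xs => (if base + x < 0 then 1 else 0) + negPref (base + x) xs

theorem negPref_append (L R : List Int) (base : Int) :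
    negPref base (L ++ R) = negPref base L + negPref (base + L.sum) R := by
  induction L generalizing base with
  | nil => simp [negPref]
  | cons x L ih =>
    simp only [List.cons_append, negPref, List.sum_cons, ih]
    ring_nf

theorem solGo_eq : ∀ n (xs : List Int), xs.length = n → ∀ base, solGo xs base = negPref base xs := by
  intro n
  induction n using Nat.strong_induction_on with
  | _ n ih =>
    intro xs hlen base
    rw [solGo]
    match xs, hlen with
    | [], _ => simp [negPref]
    | [x], _ => simp [negPref, List.headI]
    | x :: y :: xs, hlen =>
      have hne0 : (x :: y :: xs).length ≠ 0 := by simp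
      have hne1 : (x :: y :: xs).length ≠ 1 := by simp
      rw [if_neg hne0, if_neg hne1]
      have h2 : 2 ≤ (x :: y :: xs).length := by simp
      have hm : (x :: y :: xs).length / 2 < n ∧ 1 ≤ (x :: y :: xs).length / 2 := by omega
      have h1 := ih ((x :: y :: xs).take ((x :: y :: xs).length / 2)).length
        (by rw [List.length_take]; omega) _ rfl
      have hdl : ((x :: y :: xs).drop ((x :: y :: xs).length / 2)).length < n := by
        rw [List.length_drop]; omega
      have h2' := ih _ hdl ((x :: y :: xs).drop ((x :: y :: xs).length / 2)) rfl
      rw [h1, h2', ← negPref_append, List.take_append_drop]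

theorem solution_loop_eq (xs : List Int) (ans rem : Int) :
    (xs.foldl
      (fun (st : Int × Int) rec =>
        let remains := st.2 + rec
        (if remains < 0 then st.1 + 1 else st.1, remains))
      (ans, rem)).1
    = ans + negPref rem xs := by
  induction xs generalizing ans rem with
  | nil => simp [negPref]
  | cons x xs ih =>
    simp only [List.foldl, negPref]
    by_cases h : rem + x < 0
    · simp only [h, if_true]; rw [ih]; ring
    · simp only [h, if_false]; rw [ih]; ring

-- ===== VERDICT (by name: the statement is the Claim_ definition above) =====
theorem solution_spec : Claim_equal_solution := by
  intro record _
  unfold Spec_solution solution solution_alt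
  rw [solGo_eq record.length record rfl 0]
  simpa using solution_loop_eq record 0 0
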